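-- pv_equiv track=rewrite | github.com/antosquicciarini/cnd_early_stopping_label_noise | programs/performances.py | last_local_min
-- ===== SOURCE A (Python) =====
-- def last_local_min(time_series):
--     n = len(time_series)
--
--     if n < 3:
--         return n-1  # Not enough points to find a local minimum
--
--     for i in range(n - 2, 0, -1):
--         if time_series[i - 1] > time_series[i] < time_series[i + 1]:
--             return i
--
--     return n-1  # Return last point
-- ===== SOURCE B (Python) =====
-- def last_local_min(time_series):
--     n = len(time_series)
--     best = n - 1  # fallback: last point (also covers n < 3)
--     idx = 1
--     for a, b, c in zip(time_series, time_series[1:], time_series[2:]):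
--         if a > b < c:
--             best = idx
--         idx += 1
--     return best
-- ===== Notes on version B (the rewrite author's own statement) =====
-- stated objective: alternative
-- what changed: B drops index arithmetic entirely: it zips the series with its two shifted copies and makes one forward fold over consecutive value triples, remembering the latest local-minimum position, instead of A's backward indexed scan with an early return.
import Mathlib
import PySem

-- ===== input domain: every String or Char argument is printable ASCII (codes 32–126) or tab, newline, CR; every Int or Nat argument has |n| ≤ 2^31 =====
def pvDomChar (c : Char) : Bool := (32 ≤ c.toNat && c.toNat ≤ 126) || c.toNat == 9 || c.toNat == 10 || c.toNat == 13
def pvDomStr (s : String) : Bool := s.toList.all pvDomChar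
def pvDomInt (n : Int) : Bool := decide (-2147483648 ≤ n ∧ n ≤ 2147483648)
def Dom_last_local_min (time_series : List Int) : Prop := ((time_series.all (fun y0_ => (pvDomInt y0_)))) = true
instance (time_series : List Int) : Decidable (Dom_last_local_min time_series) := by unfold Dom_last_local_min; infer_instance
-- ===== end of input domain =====

-- B replaces A's backward indexed early-return scan by a single forward fold over
-- zipped value triples (no indexing into the list at all); same O(n) cost (objective: alternative).

-- ===== PORT A =====
-- A: backward loop 'for i in range(n-2, 0, -1): if ts[i-1] > ts[i] < ts[i+1]: return i';
-- the early-return loop is the first match along that countdown range (List.find?).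
def last_local_min (time_series : List Int) : Int :=
  let n : Int := time_series.length
  if n < 3 then n - 1
  else
    match (PySem.List.pyRange (n - 2) 0 (-1)).find?
        (fun i => decide (PySem.List.pyGetD time_series (i - 1) 0 > PySem.List.pyGetD time_series i 0
          ∧ PySem.List.pyGetD time_series i 0 < PySem.List.pyGetD time_series (i + 1) 0)) with
    | some i => i
    | none => n - 1

-- ===== PORT B =====
-- B: zip the series with its two shifted copies (ts[1:] = slice from 1, ts[2:] = slice from 2)
-- and fold once over the triples, carrying (best, idx); best starts at n-1 and is overwritten
-- at every local minimum met, so it ends as the last one (or stays n-1).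
def last_local_min_alt (time_series : List Int) : Int :=
  let n : Int := time_series.length
  let trips := (time_series.zip (PySem.List.slice time_series (some 1) none)).zip
                 (PySem.List.slice time_series (some 2) none)
  (trips.foldl
    (fun (s : Int × Int) t =>
      (if t.1.1 > t.1.2 ∧ t.1.2 < t.2 then s.2 else s.1, s.2 + 1))
    (n - 1, 1)).1

-- ===== PRECONDITION & SPEC =====
def Spec_last_local_min (time_series : List Int) (out : Int) : Prop := out = last_local_min_alt time_series
instance (time_series : List Int) (out : Int) : Decidable (Spec_last_local_min time_series out) := by unfold Spec_last_local_min; infer_instance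

-- ===== CLAIM (what is proved, stated in full; the proofs are below) =====
def Claim_equal_last_local_min : Prop := ∀ (time_series : List Int), Dom_last_local_min time_series → Spec_last_local_min time_series (last_local_min time_series)

-- ===== LEMMAS AND PROOFS =====

-- first match when scanning a list from the back = last match scanning it from the front
theorem find?_reverse_eq_getLast?_filter {α : Type} (p : α → Bool) (l : List α) :
    l.reverse.find? p = (l.filter p).getLast? := by
  rw [List.getLast?_eq_head?_reverse, ← List.filter_reverse, List.head?_filter]

-- B's fold over any triple list = last index (counted from i0) of an element satisfying P, else b0
theorem foldl_lastHit {α : Type} (P : α → Prop) [DecidablePred P] :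
    ∀ (l : List α) (i0 b0 : Int),
    (l.foldl (fun (s : Int × Int) t => (if P t then s.2 else s.1, s.2 + 1)) (b0, i0)).1
      = ((((PySem.List.pyRange i0 (i0 + l.length) 1).zip l).filter
            (fun p => decide (P p.2))).getLast?.map Prod.fst).getD b0 := by
  intro l
  induction l with
  | nil => intro i0 b0; simp
  | cons t rest ih =>
    intro i0 b0
    have hb : i0 + (((t :: rest).length : Nat) : Int) = i0 + 1 + (rest.length : Int) := by
      simp only [List.length_cons]; push_cast; omega
    rw [hb, PySem.List.pyRange_one_cons (by omega)]
    simp only [List.zip_cons_cons, List.filter_cons, List.foldl_cons]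
    by_cases hP : P t
    · simp only [hP, if_true, decide_true, ih (i0 + 1) i0, List.getLast?_cons]
      cases h : (List.filter (fun p => decide (P p.2))
          ((PySem.List.pyRange (i0 + 1) (i0 + 1 + (rest.length : Int))).zip rest)).getLast? <;>
        simp
    · simp only [hP, if_false, decide_false, Bool.false_eq_true]
      rw [ih (i0 + 1) b0]

-- the indexed-triple predicate agrees with A's pyGetD predicate on every zipped pair
theorem zip_pred_agree (ts : List Int) :
    ∀ p ∈ (PySem.List.pyRange 1 (1 + (((ts.zip (ts.drop 1)).zip (ts.drop 2)).length : Int)) 1).zip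
            ((ts.zip (ts.drop 1)).zip (ts.drop 2)),
    (decide (p.2.1.1 > p.2.1.2 ∧ p.2.1.2 < p.2.2))
      = (fun i => decide (PySem.List.pyGetD ts (i - 1) 0 > PySem.List.pyGetD ts i 0
          ∧ PySem.List.pyGetD ts i 0 < PySem.List.pyGetD ts (i + 1) 0)) p.1 := by
  intro p hp
  obtain ⟨i, tr⟩ := p
  obtain ⟨k, hk, hpk⟩ := List.mem_iff_getElem.mp hp
  rw [List.getElem_zip] at hpk
  obtain ⟨h1, h2⟩ := (Prod.mk.injEq ..).mp hpk
  have hklen : k < ((ts.zip (ts.drop 1)).zip (ts.drop 2)).length := by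
    simp only [List.length_zip, PySem.List.length_pyRange_one] at hk ⊢
    omega
  have hk2 : k + 2 < ts.length := by
    simp only [List.length_zip, List.length_drop] at hklen
    omega
  have h1' : i = (1 : Int) + k := by
    rw [← h1, PySem.List.getElem_pyRange_one]
  subst h1'
  rw [← h2]
  clear h2 hpk hp h1
  simp only [List.getElem_zip, List.getElem_drop]
  simp only [show (1 : Int) + (k : Int) = (((k + 1 : Nat)) : Int) from by push_cast; ring]
  rw [PySem.List.pyGetD_eq_getElem ts 0 (by omega) (by push_cast; omega),
      PySem.List.pyGetD_eq_getElem ts 0 (by omega) (by push_cast; omega),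
      PySem.List.pyGetD_eq_getElem ts 0 (by omega) (by push_cast; omega)]
  simp [show ((k : Int) + 1 + 1).toNat = k + 2 from by omega, Nat.add_comm]

theorem last_local_min_eq (time_series : List Int) :
    last_local_min time_series = last_local_min_alt time_series := by
  unfold last_local_min last_local_min_alt
  rw [PySem.List.slice_from time_series (a := 1) (by norm_num),
      PySem.List.slice_from time_series (a := 2) (by norm_num)]
  simp only [show ((1 : Int)).toNat = 1 from rfl, show ((2 : Int)).toNat = 2 from rfl]
  by_cases h : (time_series.length : Int) < 3
  · have ht : (time_series.zip (time_series.drop 1)).zip (time_series.drop 2) = [] := by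
      apply List.eq_nil_of_length_eq_zero
      simp only [List.length_zip, List.length_drop]
      omega
    simp only [if_pos h, ht, List.foldl_nil]
  · have hlen : (1 : Int) + (((time_series.zip (time_series.drop 1)).zip (time_series.drop 2)).length : Int)
        = (time_series.length : Int) - 1 := by
      simp only [List.length_zip, List.length_drop]
      push_cast
      omega
    simp only [if_neg h]
    rw [foldl_lastHit, hlen, PySem.List.pyRange_neg_one_eq_reverse,
        show ((0 : Int) + 1) = 1 from by ring,
        show ((time_series.length : Int) - 2 + 1) = (time_series.length : Int) - 1 from by ring,
        find?_reverse_eq_getLast?_filter]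
    have hcongr : (((PySem.List.pyRange 1 ((time_series.length : Int) - 1) 1).zip
            ((time_series.zip (time_series.drop 1)).zip (time_series.drop 2))).filter
          (fun p => decide (p.2.1.1 > p.2.1.2 ∧ p.2.1.2 < p.2.2)))
        = (((PySem.List.pyRange 1 ((time_series.length : Int) - 1) 1).zip
            ((time_series.zip (time_series.drop 1)).zip (time_series.drop 2))).filter
          ((fun i => decide (PySem.List.pyGetD time_series (i - 1) 0 > PySem.List.pyGetD time_series i 0
            ∧ PySem.List.pyGetD time_series i 0 < PySem.List.pyGetD time_series (i + 1) 0)) ∘ Prod.fst)) := by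
      apply List.filter_congr
      intro p hp
      exact zip_pred_agree time_series p (by rw [hlen]; exact hp)
    rw [hcongr, ← List.getLast?_map, ← List.filter_map,
        List.map_fst_zip (by rw [PySem.List.length_pyRange_one]; simp [List.length_zip]; omega)]
    cases hres : ((PySem.List.pyRange 1 ((time_series.length : Int) - 1) 1).filter
        (fun i => decide (PySem.List.pyGetD time_series (i - 1) 0 > PySem.List.pyGetD time_series i 0
          ∧ PySem.List.pyGetD time_series i 0 < PySem.List.pyGetD time_series (i + 1) 0))).getLast? <;>
      simp

-- ===== VERDICT (by name: the statement is the Claim_ definition above) =====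
theorem last_local_min_spec : Claim_equal_last_local_min := by
  intro ts _
  unfold Spec_last_local_min
  exact last_local_min_eq ts
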